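-- pv_equiv track=rewrite | github.com/jrderuiter/pyim | src/pyim/align/base.py | _group_by_position
-- ===== SOURCE A (Python) =====
-- def _group_by_position(sample_keys, max_dist):
--     sample_keys = list(sample_keys)
--
--     curr_group = [sample_keys[0]]
--     prev_pos = curr_group[0][1]
--
--     for key in sample_keys[1:]:
--         if (key[1] - prev_pos) > max_dist:
--             yield curr_group
--             curr_group = [key]
--         else:
--             curr_group.append(key)
--         prev_pos = key[1]
--
--     yield curr_group
-- ===== SOURCE B (Python) =====
-- def _group_by_position(sample_keys, max_dist):
--     keys = list(sample_keys)
--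
--     def split_run(prev_pos, rest):
--         # longest prefix of rest chained to prev_pos, plus the remainder
--         i = 0
--         while i < len(rest) and rest[i][1] - prev_pos <= max_dist:
--             prev_pos = rest[i][1]
--             i += 1
--         return rest[:i], rest[i:]
--
--     while keys:
--         head = keys[0]
--         run, rem = split_run(head[1], keys[1:])
--         yield [head] + run
--         keys = rem
-- ===== Notes on version B (the rewrite author's own statement) =====
-- stated objective: alternative
-- what changed: Replaces A's single accumulator loop carrying (current group, previous position) by a recursive decomposition: split_run peels off the longest run chained within max_dist, and groups yields it and recurses on the remainder.
import Mathlib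
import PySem

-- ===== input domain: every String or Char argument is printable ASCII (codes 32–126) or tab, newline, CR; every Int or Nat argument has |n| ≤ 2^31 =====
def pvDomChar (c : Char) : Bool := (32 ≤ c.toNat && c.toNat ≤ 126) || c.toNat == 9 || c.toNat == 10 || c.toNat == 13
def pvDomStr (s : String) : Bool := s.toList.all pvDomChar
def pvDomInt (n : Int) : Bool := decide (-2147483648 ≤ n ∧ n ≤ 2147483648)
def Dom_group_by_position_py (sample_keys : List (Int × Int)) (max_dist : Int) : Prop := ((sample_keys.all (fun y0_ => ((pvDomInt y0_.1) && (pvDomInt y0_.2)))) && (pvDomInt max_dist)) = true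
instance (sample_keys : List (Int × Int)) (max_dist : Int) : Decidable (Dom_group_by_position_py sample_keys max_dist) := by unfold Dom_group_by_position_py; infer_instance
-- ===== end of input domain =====

-- B replaces A's single accumulator loop by a recursive decomposition (split off the
-- longest chained run, recurse on the remainder); objective: alternative, not faster.
-- Both Pythons return generators; equivalence is about the materialized list of yields.

-- ===== PORT A =====
-- state = (yielded groups so far, curr_group, prev_pos)
def group_by_position_py (sample_keys : List (Int × Int)) (max_dist : Int) : List (List (Int × Int)) :=
  match sample_keys with
  | [] => []  -- A raises IndexError here; excluded by Pre_
  | k0 :: rest =>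
    let s := rest.foldl
      (fun (st : List (List (Int × Int)) × List (Int × Int) × Int) key =>
        if key.2 - st.2.2 > max_dist then (st.1 ++ [st.2.1], [key], key.2)
        else (st.1, st.2.1 ++ [key], key.2))
      ([], [k0], k0.2)
    s.1 ++ [s.2.1]

-- ===== PORT B =====
-- Source B's split_run: longest prefix of rest chained to prev_pos, plus the remainder
def pvSplitRun (max_dist : Int) (prev_pos : Int) : List (Int × Int) → List (Int × Int) × List (Int × Int)
  | [] => ([], [])
  | k :: rest =>
    if k.2 - prev_pos ≤ max_dist then
      let (run, rem) := pvSplitRun max_dist k.2 rest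
      (k :: run, rem)
    else ([], k :: rest)

theorem pvSplitRun_rem_len (max_dist prev_pos : Int) (xs : List (Int × Int)) :
    (pvSplitRun max_dist prev_pos xs).2.length ≤ xs.length := by
  induction xs generalizing prev_pos with
  | nil => simp [pvSplitRun]
  | cons k rest ih =>
    simp only [pvSplitRun]
    split
    · exact le_trans (ih k.2) (Nat.le_succ _)
    · simp

-- Source B's groups: yield head's run, recurse on the remainder
def pvGroupsB (max_dist : Int) : List (Int × Int) → List (List (Int × Int))
  | [] => []  -- unreachable in Source B (groups is only called on non-empty lists)
  | h :: t =>
    let p := pvSplitRun max_dist h.2 t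
    (h :: p.1) :: (if p.2 = [] then [] else pvGroupsB max_dist p.2)
termination_by ks => ks.length
decreasing_by
  exact Nat.lt_succ_of_le (pvSplitRun_rem_len max_dist h.2 t)

def group_by_position_py_alt (sample_keys : List (Int × Int)) (max_dist : Int) : List (List (Int × Int)) :=
  match sample_keys with
  | [] => []
  | _ => pvGroupsB max_dist sample_keys

-- ===== PRECONDITION & SPEC =====
-- A raises IndexError on the empty list (sample_keys[0]); excluded.
def Pre_group_by_position_py (sample_keys : List (Int × Int)) (max_dist : Int) : Prop :=
  sample_keys ≠ []
instance (sample_keys : List (Int × Int)) (max_dist : Int) : Decidable (Pre_group_by_position_py sample_keys max_dist) := by unfold Pre_group_by_position_py; infer_instance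
def pvWitness_group_by_position_py : (List (Int × Int)) × Int := ([(1, 2), (3, 4)], 1)

def Spec_group_by_position_py (sample_keys : List (Int × Int)) (max_dist : Int) (out : List (List (Int × Int))) : Prop := out = group_by_position_py_alt sample_keys max_dist
instance (sample_keys : List (Int × Int)) (max_dist : Int) (out : List (List (Int × Int))) : Decidable (Spec_group_by_position_py sample_keys max_dist out) := by unfold Spec_group_by_position_py; infer_instance

-- ===== CLAIM (what is proved, stated in full; the proofs are below) =====
def Claim_equal_group_by_position_py : Prop := ∀ (sample_keys : List (Int × Int)) (max_dist : Int), Dom_group_by_position_py sample_keys max_dist → Pre_group_by_position_py sample_keys max_dist → Spec_group_by_position_py sample_keys max_dist (group_by_position_py sample_keys max_dist)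
-- ===== LEMMAS AND PROOFS =====

-- Loop invariant: A's fold, started in state (out, curr, prev), produces out followed by
-- curr extended with the run chained to prev, then B's groups of the remainder.
theorem pvFold_eq (max_dist : Int) (rest : List (Int × Int)) :
    ∀ (out : List (List (Int × Int))) (curr : List (Int × Int)) (prev : Int),
    (let s := rest.foldl
      (fun (st : List (List (Int × Int)) × List (Int × Int) × Int) key =>
        if key.2 - st.2.2 > max_dist then (st.1 ++ [st.2.1], [key], key.2)
        else (st.1, st.2.1 ++ [key], key.2))
      (out, curr, prev)
     s.1 ++ [s.2.1]) =
    out ++ ((curr ++ (pvSplitRun max_dist prev rest).1) ::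
      (if (pvSplitRun max_dist prev rest).2 = [] then []
       else pvGroupsB max_dist (pvSplitRun max_dist prev rest).2)) := by
  induction rest with
  | nil => intro out curr prev; simp [pvSplitRun]
  | cons k rest' ih =>
    intro out curr prev
    by_cases h : k.2 - prev > max_dist
    · have hle : ¬ (k.2 - prev ≤ max_dist) := by omega
      simp only [List.foldl_cons, if_pos h, pvSplitRun, if_neg hle]
      rw [ih (out ++ [curr]) [k] k.2]
      simp [pvGroupsB, List.append_assoc]
    · have hle : k.2 - prev ≤ max_dist := by omega
      simp only [List.foldl_cons, if_neg h, pvSplitRun, if_pos hle]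
      rw [ih out (curr ++ [k]) k.2]
      simp

-- ===== VERDICT (by name: the statement is the Claim_ definition above) =====
theorem group_by_position_py_spec : Claim_equal_group_by_position_py := by
  intro sample_keys max_dist _ hpre
  unfold Spec_group_by_position_py
  match sample_keys with
  | [] => exact absurd rfl hpre
  | k0 :: rest =>
    show _ = group_by_position_py_alt (k0 :: rest) max_dist
    simp only [group_by_position_py, group_by_position_py_alt]
    rw [pvFold_eq max_dist rest [] [k0] k0.2]
    simp [pvGroupsB]
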